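-- pv_equiv track=rewrite | github.com/alanjaouen/advent-of-code | 2023/day10/part2.py | zoomin
-- ===== SOURCE A (Python) =====
-- dic = {
--     '|': ['UP', 'DOWN'],
--     '-': ['LEFT', 'RIGHT'],
--     'L': ['UP', 'RIGHT'],
--     'J': ['UP', 'LEFT'],
--     '7': ['DOWN', 'LEFT'],
--     'F': ['DOWN', 'RIGHT'],
-- }
--
-- def zoomin(map_data):
--     big = []
--     for yi in range(len(map_data)):
--         line1 = []
--         line2 = []
--         line3 = []
--         for xi in range(len(map_data[yi])):
--             UP = '#' if 'UP' in dic[map_data[yi][xi]] else '.'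
--             DOWN = '#' if 'DOWN' in dic[map_data[yi][xi]] else '.'
--             LEFT = '#' if 'LEFT' in dic[map_data[yi][xi]] else '.'
--             RIGHT = '#' if 'RIGHT' in dic[map_data[yi][xi]] else '.'
--             line1.extend(['.', UP, '.'])
--             line2.extend([LEFT, map_data[yi][xi], RIGHT])
--             line3.extend(['.', DOWN, '.'])
--         big.extend([line1, line2, line3])
--     return big
-- ===== SOURCE B (Python) =====
-- CONN = {'|': 12, '-': 3, 'L': 9, 'J': 10, '7': 6, 'F': 5}  # bits: UP=8 DOWN=4 LEFT=2 RIGHT=1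
--
-- def cell(c, dy, dx):
--     bits = CONN[c]
--     if (dy, dx) == (1, 1):
--         return c
--     if (dy, dx) == (0, 1):
--         return '#' if bits & 8 else '.'
--     if (dy, dx) == (2, 1):
--         return '#' if bits & 4 else '.'
--     if (dy, dx) == (1, 0):
--         return '#' if bits & 2 else '.'
--     if (dy, dx) == (1, 2):
--         return '#' if bits & 1 else '.'
--     return '.'
--
-- def zoomin(map_data):
--     big = []
--     for Y in range(3 * len(map_data)):
--         row = map_data[Y // 3]
--         big.append([cell(row[X // 3], Y % 3, X % 3) for X in range(3 * len(row))])
--     return big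
-- ===== Notes on version B (the rewrite author's own statement) =====
-- stated objective: alternative
-- what changed: B computes the scaled grid by iterating over OUTPUT coordinates (Y,X) and deriving each cell directly from map_data[Y//3][X//3] and the sub-position (Y%3,X%3) via a connectivity bitmask, instead of A's push-style expansion that walks the input and interleaves three accumulator lines per input row.
import Mathlib
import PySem

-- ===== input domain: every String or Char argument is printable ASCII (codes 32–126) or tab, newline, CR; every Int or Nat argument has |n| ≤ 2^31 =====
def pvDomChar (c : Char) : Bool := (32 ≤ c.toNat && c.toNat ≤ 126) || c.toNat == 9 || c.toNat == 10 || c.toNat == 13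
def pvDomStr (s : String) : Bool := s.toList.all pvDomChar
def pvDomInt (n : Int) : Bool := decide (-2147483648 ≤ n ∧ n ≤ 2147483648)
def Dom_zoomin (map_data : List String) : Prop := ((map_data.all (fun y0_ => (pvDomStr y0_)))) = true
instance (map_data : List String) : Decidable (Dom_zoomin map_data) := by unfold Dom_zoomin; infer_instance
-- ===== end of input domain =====

-- B iterates over OUTPUT coordinates (Y,X), computing each cell directly from
-- map_data[Y//3][X//3] and the sub-position (Y%3,X%3) via a connectivity bitmask ("pull" style);
-- A walks the INPUT and interleaves three accumulator lines per input row ("push" style).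

-- ===== PORT A =====
-- dic = {...} (lookup returns none exactly where Python raises KeyError; Pre_ excludes that)
def pvDic (c : Char) : Option (List String) :=
  if c = '|' then some ["UP", "DOWN"]
  else if c = '-' then some ["LEFT", "RIGHT"]
  else if c = 'L' then some ["UP", "RIGHT"]
  else if c = 'J' then some ["UP", "LEFT"]
  else if c = '7' then some ["DOWN", "LEFT"]
  else if c = 'F' then some ["DOWN", "RIGHT"]
  else none

-- body of A's inner loop over xi (cell index); cs = chars of the current row
def pvStepA (cs : List Char) (st : List String × List String × List String) (xi : Nat) :
    List String × List String × List String :=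
  let c := cs.getD xi ' '
  let dirs := (pvDic c).getD []
  let UP := if ("UP" : String) ∈ dirs then "#" else "."
  let DOWN := if ("DOWN" : String) ∈ dirs then "#" else "."
  let LEFT := if ("LEFT" : String) ∈ dirs then "#" else "."
  let RIGHT := if ("RIGHT" : String) ∈ dirs then "#" else "."
  (st.1 ++ [".", UP, "."], st.2.1 ++ [LEFT, String.mk [c], RIGHT], st.2.2 ++ [".", DOWN, "."])

def zoomin (map_data : List String) : List (List String) :=
  (List.range map_data.length).foldl
    (fun big yi =>
      let row := (map_data.getD yi "").toList
      let st := (List.range row.length).foldl (pvStepA row) ([], [], [])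
      big ++ [st.1, st.2.1, st.2.2])
    []

-- ===== PORT B =====
-- CONN = {...}: connectivity bitmask, bits UP=8 DOWN=4 LEFT=2 RIGHT=1 (none = KeyError, excluded by Pre_)
def pvConn (c : Char) : Option Nat :=
  if c = '|' then some 12
  else if c = '-' then some 3
  else if c = 'L' then some 9
  else if c = 'J' then some 10
  else if c = '7' then some 6
  else if c = 'F' then some 5
  else none

-- cell(c, dy, dx): the output character at sub-position (dy,dx) of the tile for c
def pvCellB (c : Char) (dy dx : Nat) : String :=
  let bits := (pvConn c).getD 0
  if dy = 1 ∧ dx = 1 then String.mk [c]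
  else if dy = 0 ∧ dx = 1 then (if bits &&& 8 ≠ 0 then "#" else ".")
  else if dy = 2 ∧ dx = 1 then (if bits &&& 4 ≠ 0 then "#" else ".")
  else if dy = 1 ∧ dx = 0 then (if bits &&& 2 ≠ 0 then "#" else ".")
  else if dy = 1 ∧ dx = 2 then (if bits &&& 1 ≠ 0 then "#" else ".")
  else "."

def zoomin_alt (map_data : List String) : List (List String) :=
  (List.range (3 * map_data.length)).foldl
    (fun big Y =>
      let row := (map_data.getD (Y / 3) "").toList
      big ++ [(List.range (3 * row.length)).foldl
        (fun out X => out ++ [pvCellB (row.getD (X / 3) ' ') (Y % 3) (X % 3)]) []])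
    []

-- ===== PRECONDITION & SPEC =====
def pvIsPipe (c : Char) : Bool :=
  c == '|' || c == '-' || c == 'L' || c == 'J' || c == '7' || c == 'F'

-- Pre_ excludes inputs containing a character that is not one of the six pipe chars:
-- there Python A raises KeyError (dic[c]) and returns nothing (B raises there too).
def Pre_zoomin (map_data : List String) : Prop :=
  (map_data.all (fun s => s.toList.all pvIsPipe)) = true
instance (map_data : List String) : Decidable (Pre_zoomin map_data) := by
  unfold Pre_zoomin; infer_instance

def pvWitness_zoomin : List String := ["|-", "LJ", "7F"]

def Spec_zoomin (map_data : List String) (out : List (List String)) : Prop := out = zoomin_alt map_data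
instance (map_data : List String) (out : List (List String)) : Decidable (Spec_zoomin map_data out) := by unfold Spec_zoomin; infer_instance

-- ===== CLAIM (what is proved, stated in full; the proofs are below) =====
def Claim_equal_zoomin : Prop := ∀ (map_data : List String), Dom_zoomin map_data → Pre_zoomin map_data → Spec_zoomin map_data (zoomin map_data)

-- ===== LEMMAS AND PROOFS =====

-- generic: foldl over a list only depends on the step function's values on its members
lemma foldl_congr_mem' {α β : Type} (l : List β) (f g : α → β → α)
    (h : ∀ b ∈ l, ∀ a, f a b = g a b) : ∀ a, l.foldl f a = l.foldl g a := by
  induction l with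
  | nil => intro a; rfl
  | cons b l ih =>
    intro a
    rw [List.foldl_cons, List.foldl_cons, h b (by simp)]
    exact ih (fun b' hb' a' => h b' (by simp [hb']) a') _

-- ----- A-side canonical form -----
-- A's inner step, phrased on the character itself (proof-only helper)
def pvStepC (st : List String × List String × List String) (c : Char) :
    List String × List String × List String :=
  let dirs := (pvDic c).getD []
  let UP := if ("UP" : String) ∈ dirs then "#" else "."
  let DOWN := if ("DOWN" : String) ∈ dirs then "#" else "."
  let LEFT := if ("LEFT" : String) ∈ dirs then "#" else "."
  let RIGHT := if ("RIGHT" : String) ∈ dirs then "#" else "."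
  (st.1 ++ [".", UP, "."], st.2.1 ++ [LEFT, String.mk [c], RIGHT], st.2.2 ++ [".", DOWN, "."])

-- the three-string contribution of one cell to each of A's three lines
def pvF1 (c : Char) : List String :=
  [".", if ("UP" : String) ∈ (pvDic c).getD [] then "#" else ".", "."]
def pvF2 (c : Char) : List String :=
  [if ("LEFT" : String) ∈ (pvDic c).getD [] then "#" else ".", String.mk [c],
   if ("RIGHT" : String) ∈ (pvDic c).getD [] then "#" else "."]
def pvF3 (c : Char) : List String :=
  [".", if ("DOWN" : String) ∈ (pvDic c).getD [] then "#" else ".", "."]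

lemma rangeFoldA (cs : List Char) :
    ∀ st, (List.range cs.length).foldl (pvStepA cs) st = cs.foldl pvStepC st := by
  induction cs with
  | nil => intro st; simp
  | cons c cs ih =>
    intro st
    rw [List.length_cons, List.range_succ_eq_map, List.foldl_cons, List.foldl_map]
    have h0 : pvStepA (c :: cs) st 0 = pvStepC st c := by
      simp [pvStepA, pvStepC]
    have h : (fun st (xi : Nat) => pvStepA (c :: cs) st (Nat.succ xi)) = pvStepA cs := by
      funext st xi
      simp [pvStepA]
    rw [h0, h, List.foldl_cons, ih]

lemma foldC_eq (cs : List Char) :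
    ∀ a1 a2 a3, cs.foldl pvStepC (a1, a2, a3) =
      (a1 ++ cs.flatMap pvF1, a2 ++ cs.flatMap pvF2, a3 ++ cs.flatMap pvF3) := by
  induction cs with
  | nil => intro a1 a2 a3; simp
  | cons c cs ih =>
    intro a1 a2 a3
    rw [List.foldl_cons]
    have hc : pvStepC (a1, a2, a3) c = (a1 ++ pvF1 c, a2 ++ pvF2 c, a3 ++ pvF3 c) := by
      simp [pvStepC, pvF1, pvF2, pvF3]
    rw [hc, ih]
    simp [List.flatMap_cons, List.append_assoc]

lemma rangeFoldOuterA (map_data : List String) :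
    ∀ big, (List.range map_data.length).foldl
      (fun big yi =>
        let row := (map_data.getD yi "").toList
        let st := (List.range row.length).foldl (pvStepA row) ([], [], [])
        big ++ [st.1, st.2.1, st.2.2]) big =
      map_data.foldl
        (fun big row =>
          let cs := row.toList
          let st := (List.range cs.length).foldl (pvStepA cs) ([], [], [])
          big ++ [st.1, st.2.1, st.2.2]) big := by
  induction map_data with
  | nil => intro big; simp
  | cons r rs ih =>
    intro big
    rw [List.length_cons, List.range_succ_eq_map, List.foldl_cons, List.foldl_map, List.foldl_cons]
    have h : (fun (big : List (List String)) (yi : Nat) =>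
        let row := ((r :: rs).getD (Nat.succ yi) "").toList
        let st := (List.range row.length).foldl (pvStepA row) ([], [], [])
        big ++ [st.1, st.2.1, st.2.2]) =
        (fun (big : List (List String)) (yi : Nat) =>
        let row := (rs.getD yi "").toList
        let st := (List.range row.length).foldl (pvStepA row) ([], [], [])
        big ++ [st.1, st.2.1, st.2.2]) := by
      funext big yi
      simp
    rw [h, ih]
    rfl

-- A's whole result as a flatMap over the rows
lemma zoomin_canon (map_data : List String) :
    zoomin map_data = map_data.flatMap (fun r =>
      [r.toList.flatMap pvF1, r.toList.flatMap pvF2, r.toList.flatMap pvF3]) := by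
  unfold zoomin
  rw [rangeFoldOuterA]
  have : ∀ (rs : List String) (big : List (List String)),
      rs.foldl (fun big row =>
          let cs := row.toList
          let st := (List.range cs.length).foldl (pvStepA cs) ([], [], [])
          big ++ [st.1, st.2.1, st.2.2]) big =
      big ++ rs.flatMap (fun r =>
        [r.toList.flatMap pvF1, r.toList.flatMap pvF2, r.toList.flatMap pvF3]) := by
    intro rs
    induction rs with
    | nil => intro big; simp
    | cons r rs ih =>
      intro big
      rw [List.foldl_cons]
      dsimp only
      rw [rangeFoldA, foldC_eq, ih]
      simp [List.flatMap_cons, List.append_assoc]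
  simpa using this map_data []

-- ----- B-side canonical form -----
-- the three cells of one tile row dy for char c
def pvGB (dy : Nat) (c : Char) : List String := [pvCellB c dy 0, pvCellB c dy 1, pvCellB c dy 2]

-- B's inner loop over X produces the flatMap of per-char tile rows
lemma innerB_eq (dy : Nat) (cs : List Char) :
    ∀ acc, (List.range (3 * cs.length)).foldl
      (fun out X => out ++ [pvCellB (cs.getD (X / 3) ' ') dy (X % 3)]) acc =
      acc ++ cs.flatMap (pvGB dy) := by
  induction cs using List.reverseRecOn with
  | nil => intro acc; simp
  | append_singleton cs c ih =>
    intro acc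
    have hlen : 3 * (cs ++ [c]).length = 3 * cs.length + 1 + 1 + 1 := by
      simp; omega
    rw [hlen, List.range_succ, List.range_succ, List.range_succ,
        List.foldl_append, List.foldl_append, List.foldl_append]
    have hcongr : (List.range (3 * cs.length)).foldl
        (fun out X => out ++ [pvCellB ((cs ++ [c]).getD (X / 3) ' ') dy (X % 3)]) acc =
        (List.range (3 * cs.length)).foldl
        (fun out X => out ++ [pvCellB (cs.getD (X / 3) ' ') dy (X % 3)]) acc := by
      apply foldl_congr_mem'
      intro X hX a
      have hX' : X < 3 * cs.length := List.mem_range.mp hX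
      have hdiv : X / 3 < cs.length := by omega
      rw [List.getD_append _ _ _ _ hdiv]
    rw [hcongr, ih]
    have e0 : (3 * cs.length) / 3 = cs.length := by omega
    have e1 : (3 * cs.length + 1) / 3 = cs.length := by omega
    have e2 : (3 * cs.length + 1 + 1) / 3 = cs.length := by omega
    have m0 : (3 * cs.length) % 3 = 0 := by omega
    have m1 : (3 * cs.length + 1) % 3 = 1 := by omega
    have m2 : (3 * cs.length + 1 + 1) % 3 = 2 := by omega
    simp only [List.foldl_cons, List.foldl_nil, e0, e1, e2, m0, m1, m2]
    have hget : (cs ++ [c]).getD cs.length ' ' = c := by simp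
    rw [hget]
    simp [pvGB, List.flatMap_append, List.append_assoc]

-- B's whole result as a flatMap over the rows
lemma zoomin_alt_canon (map_data : List String) :
    zoomin_alt map_data = map_data.flatMap (fun r =>
      [r.toList.flatMap (pvGB 0), r.toList.flatMap (pvGB 1), r.toList.flatMap (pvGB 2)]) := by
  unfold zoomin_alt
  have main : ∀ (rs : List String) (acc : List (List String)),
      (List.range (3 * rs.length)).foldl
        (fun big Y =>
          let row := (rs.getD (Y / 3) "").toList
          big ++ [(List.range (3 * row.length)).foldl
            (fun out X => out ++ [pvCellB (row.getD (X / 3) ' ') (Y % 3) (X % 3)]) []]) acc =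
      acc ++ rs.flatMap (fun r =>
        [r.toList.flatMap (pvGB 0), r.toList.flatMap (pvGB 1), r.toList.flatMap (pvGB 2)]) := by
    intro rs
    induction rs using List.reverseRecOn with
    | nil => intro acc; simp
    | append_singleton rs r ih =>
      intro acc
      have hlen : 3 * (rs ++ [r]).length = 3 * rs.length + 1 + 1 + 1 := by
        simp; omega
      rw [hlen, List.range_succ, List.range_succ, List.range_succ,
          List.foldl_append, List.foldl_append, List.foldl_append]
      have hcongr : ∀ (a : List (List String)),
          (List.range (3 * rs.length)).foldl
            (fun big Y =>
              let row := ((rs ++ [r]).getD (Y / 3) "").toList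
              big ++ [(List.range (3 * row.length)).foldl
                (fun out X => out ++ [pvCellB (row.getD (X / 3) ' ') (Y % 3) (X % 3)]) []]) a =
          (List.range (3 * rs.length)).foldl
            (fun big Y =>
              let row := (rs.getD (Y / 3) "").toList
              big ++ [(List.range (3 * row.length)).foldl
                (fun out X => out ++ [pvCellB (row.getD (X / 3) ' ') (Y % 3) (X % 3)]) []]) a := by
        intro a
        apply foldl_congr_mem'
        intro Y hY a'
        have hY' : Y < 3 * rs.length := List.mem_range.mp hY
        have hdiv : Y / 3 < rs.length := by omega
        dsimp only
        rw [List.getD_append _ _ _ _ hdiv]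
      rw [hcongr, ih]
      have e0 : (3 * rs.length) / 3 = rs.length := by omega
      have e1 : (3 * rs.length + 1) / 3 = rs.length := by omega
      have e2 : (3 * rs.length + 1 + 1) / 3 = rs.length := by omega
      have m0 : (3 * rs.length) % 3 = 0 := by omega
      have m1 : (3 * rs.length + 1) % 3 = 1 := by omega
      have m2 : (3 * rs.length + 1 + 1) % 3 = 2 := by omega
      simp only [List.foldl_cons, List.foldl_nil, e0, e1, e2, m0, m1, m2]
      have hget : (rs ++ [r]).getD rs.length "" = r := by simp
      rw [hget]
      rw [innerB_eq, innerB_eq, innerB_eq]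
      simp [List.flatMap_append, List.append_assoc]
  simpa using main map_data []

-- ----- per-character agreement on pipe chars -----
lemma pipe_cases {c : Char} (h : pvIsPipe c = true) :
    c = '|' ∨ c = '-' ∨ c = 'L' ∨ c = 'J' ∨ c = '7' ∨ c = 'F' := by
  simp [pvIsPipe] at h
  tauto

lemma gb1 {c : Char} (h : pvIsPipe c = true) : pvGB 0 c = pvF1 c := by
  rcases pipe_cases h with h | h | h | h | h | h <;> subst h <;> decide
lemma gb2 {c : Char} (h : pvIsPipe c = true) : pvGB 1 c = pvF2 c := by
  rcases pipe_cases h with h | h | h | h | h | h <;> subst h <;> decide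
lemma gb3 {c : Char} (h : pvIsPipe c = true) : pvGB 2 c = pvF3 c := by
  rcases pipe_cases h with h | h | h | h | h | h <;> subst h <;> decide

-- ===== VERDICT (by name: the statement is the Claim_ definition above) =====
theorem zoomin_spec : Claim_equal_zoomin := by
  intro map_data _ hpre
  unfold Spec_zoomin
  rw [zoomin_canon, zoomin_alt_canon]
  apply List.flatMap_congr
  intro r hr
  have hrow : r.toList.all pvIsPipe = true := by
    simpa using (List.all_eq_true.mp hpre r hr)
  have h1 : r.toList.flatMap pvF1 = r.toList.flatMap (pvGB 0) := by
    apply List.flatMap_congr; intro c hc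
    exact (gb1 (by simpa using List.all_eq_true.mp hrow c hc)).symm
  have h2 : r.toList.flatMap pvF2 = r.toList.flatMap (pvGB 1) := by
    apply List.flatMap_congr; intro c hc
    exact (gb2 (by simpa using List.all_eq_true.mp hrow c hc)).symm
  have h3 : r.toList.flatMap pvF3 = r.toList.flatMap (pvGB 2) := by
    apply List.flatMap_congr; intro c hc
    exact (gb3 (by simpa using List.all_eq_true.mp hrow c hc)).symm
  rw [h1, h2, h3]
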